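-- pv_equiv track=rewrite | github.com/FailedFeather37/Machine_Learning_Groupe | init_data.py | comptage
-- ===== SOURCE A (Python) =====
-- def comptage(liste_cible_max):
--     compt1=0
--     compt0=0
--     for i in liste_cible_max:
--         if i==0:
--             compt0+=1
--         else:
--             compt1+=1
--     return (compt0,compt1)
-- ===== SOURCE B (Python) =====
-- def comptage(liste_cible_max):
--     n = len(liste_cible_max)
--     if n == 0:
--         return (0, 0)
--     if n == 1:
--         return (1, 0) if liste_cible_max[0] == 0 else (0, 1)
--     m = n // 2
--     z1, nz1 = comptage(liste_cible_max[:m])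
--     z2, nz2 = comptage(liste_cible_max[m:])
--     return (z1 + z2, nz1 + nz2)
-- ===== Notes on version B (the rewrite author's own statement) =====
-- stated objective: alternative
-- what changed: Divide-and-conquer: split the list in half, count each half recursively and add the pairs, instead of A's single left-to-right loop with two branching counters.
import Mathlib
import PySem

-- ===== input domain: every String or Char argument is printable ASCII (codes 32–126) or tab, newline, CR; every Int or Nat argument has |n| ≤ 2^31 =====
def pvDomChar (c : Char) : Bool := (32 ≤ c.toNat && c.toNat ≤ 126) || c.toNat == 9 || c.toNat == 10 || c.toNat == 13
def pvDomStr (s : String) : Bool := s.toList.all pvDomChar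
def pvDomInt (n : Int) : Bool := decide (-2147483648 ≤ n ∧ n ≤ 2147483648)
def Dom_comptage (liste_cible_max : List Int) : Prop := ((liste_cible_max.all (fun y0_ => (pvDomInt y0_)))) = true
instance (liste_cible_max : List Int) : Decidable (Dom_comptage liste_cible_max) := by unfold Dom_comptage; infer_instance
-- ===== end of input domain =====

-- B counts by divide-and-conquer (split in half, recurse, add the pairs) instead of A's single branching two-counter loop.

-- ===== PORT A =====
def comptage (liste_cible_max : List Int) : Int × Int :=
  let st := liste_cible_max.foldl
    (fun (st : Int × Int) i => if i == 0 then (st.1, st.2 + 1) else (st.1 + 1, st.2))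
    (0, 0)   -- (compt1, compt0)
  (st.2, st.1)

-- ===== PORT B =====
def comptage_alt (liste_cible_max : List Int) : Int × Int :=
  let n := liste_cible_max.length
  if _h0 : n = 0 then (0, 0)
  else if _h1 : n = 1 then
    if (PySem.List.pyGet? liste_cible_max 0).getD 0 == 0 then (1, 0) else (0, 1)
  else
    let m := n / 2   -- n // 2 (n ≥ 0, so Nat division is Python's floor division)
    let p1 := comptage_alt (PySem.List.slice liste_cible_max none (some (m : Int)))
    let p2 := comptage_alt (PySem.List.slice liste_cible_max (some (m : Int)) none)
    (p1.1 + p2.1, p1.2 + p2.2)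
termination_by liste_cible_max.length
decreasing_by
  · rw [PySem.List.slice_to_natCast]; simp [List.length_take]; omega
  · rw [PySem.List.slice_from_natCast]; simp [List.length_drop]; omega

-- ===== PRECONDITION & SPEC =====
def Spec_comptage (liste_cible_max : List Int) (out : Int × Int) : Prop := out = comptage_alt liste_cible_max
instance (liste_cible_max : List Int) (out : Int × Int) : Decidable (Spec_comptage liste_cible_max out) := by unfold Spec_comptage; infer_instance

-- ===== CLAIM =====
def Claim_equal_comptage : Prop := ∀ (liste_cible_max : List Int), Dom_comptage liste_cible_max → Spec_comptage liste_cible_max (comptage liste_cible_max)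

-- ===== LEMMAS AND PROOFS =====
theorem comptage_foldl (l : List Int) (a b : Int) :
    l.foldl (fun (st : Int × Int) i => if i == 0 then (st.1, st.2 + 1) else (st.1 + 1, st.2)) (a, b)
      = (a + ((l.length : Int) - (l.count 0 : Int)), b + (l.count 0 : Int)) := by
  induction l generalizing a b with
  | nil => simp
  | cons x xs ih =>
    simp only [List.foldl_cons, List.count_cons]
    by_cases h : x = 0
    · rw [if_pos (by simp [h]), ih]; simp [h]; ring
    · rw [if_neg (by simp [h]), ih]; simp [h]; ring_nf

theorem comptage_alt_closed : ∀ (n : ℕ) (l : List Int), l.length = n →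
    comptage_alt l = ((l.count 0 : Int), (l.length : Int) - (l.count 0 : Int)) := by
  intro n
  induction n using Nat.strong_induction_on with
  | _ n ih =>
    intro l hl
    rw [comptage_alt]
    by_cases h0 : l.length = 0
    · simp [List.length_eq_zero_iff.mp h0]
    · rw [dif_neg h0]
      by_cases h1 : l.length = 1
      · obtain ⟨x, hx⟩ := List.length_eq_one_iff.mp h1
        subst hx
        by_cases hz : x = 0 <;> simp [hz, PySem.List.pyGet?, PySem.List.pyIdx?]
      · rw [dif_neg h1]
        have h2 : 2 ≤ l.length := by omega
        set m := l.length / 2 with hm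
        have hm1 : 1 ≤ m := by omega
        have hmlt : m < l.length := by omega
        simp only [PySem.List.slice_to_natCast, PySem.List.slice_from_natCast]
        rw [ih (l.take m).length (by simp; omega) (l.take m) rfl,
            ih (l.drop m).length (by simp; omega) (l.drop m) rfl]
        have hcount : (l.take m).count 0 + (l.drop m).count 0 = l.count 0 := by
          rw [← List.count_append, List.take_append_drop]
        have hlen : (l.take m).length + (l.drop m).length = l.length := by
          rw [← List.length_append, List.take_append_drop]
        rw [Prod.mk.injEq]
        omega

-- ===== VERDICT =====
theorem comptage_spec : Claim_equal_comptage := by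
  intro l _
  unfold Spec_comptage comptage
  rw [comptage_alt_closed l.length l rfl, comptage_foldl]
  simp
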